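-- pv_equiv track=rewrite | github.com/DaFrankort/lenny-dnd-bot | lenny/logic/markdown.py | _wrap_markdown_tables
-- ===== SOURCE A (Python) =====
-- def _wrap_markdown_tables(text: str) -> str:
--     """
--     Wraps obsidian tables into codeblocks, for it to be monospace
--     Table formatting is as follows:
--
--     | 1d4 | Element |
--     | --- | ------- |
--     | 1   | Earth   |
--     | 2   | Fire    |
--     | 3   | Water   |
--     | 4   | Air     |
--     """
--     lines = text.splitlines()
--     new_lines: list[str] = []
--     inside_table = False
--     buffer: list[str] = []
--
--     def flush_table():
--         if buffer:
--             table_text = "\n".join(buffer)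
--             new_lines.append("```")
--             new_lines.append(table_text)
--             new_lines.append("```")
--             buffer.clear()
--
--     for line in lines:
--         if line.strip().startswith("|") and line.strip().endswith("|"):
--             inside_table = True
--             buffer.append(line)
--         else:
--             if inside_table:
--                 flush_table()
--                 inside_table = False
--             new_lines.append(line)
--
--     if inside_table:
--         flush_table()
--
--     return "\n".join(new_lines)
-- ===== SOURCE B (Python) =====
-- def _wrap_markdown_tables(text: str) -> str:
--     """Wrap markdown tables in code blocks, scanning maximal runs of table / non-table lines."""
--     def is_table(line: str) -> bool:
--         s = line.strip()
--         return s.startswith("|") and s.endswith("|")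
--
--     lines = text.splitlines()
--     new_lines: list[str] = []
--     i, n = 0, len(lines)
--     while i < n:
--         k = is_table(lines[i])
--         j = i + 1
--         while j < n and is_table(lines[j]) == k:
--             j += 1
--         if k:
--             new_lines += ["```", "\n".join(lines[i:j]), "```"]
--         else:
--             new_lines += lines[i:j]
--         i = j
--     return "\n".join(new_lines)
-- ===== Notes on version B (the rewrite author's own statement) =====
-- stated objective: alternative
-- what changed: Replaces A's stateful loop threading an inside_table flag and a flush buffer with a run-based scan: an inner scan finds each maximal run of table/non-table lines and emits it (fenced or verbatim) in one step.
import Mathlib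
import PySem

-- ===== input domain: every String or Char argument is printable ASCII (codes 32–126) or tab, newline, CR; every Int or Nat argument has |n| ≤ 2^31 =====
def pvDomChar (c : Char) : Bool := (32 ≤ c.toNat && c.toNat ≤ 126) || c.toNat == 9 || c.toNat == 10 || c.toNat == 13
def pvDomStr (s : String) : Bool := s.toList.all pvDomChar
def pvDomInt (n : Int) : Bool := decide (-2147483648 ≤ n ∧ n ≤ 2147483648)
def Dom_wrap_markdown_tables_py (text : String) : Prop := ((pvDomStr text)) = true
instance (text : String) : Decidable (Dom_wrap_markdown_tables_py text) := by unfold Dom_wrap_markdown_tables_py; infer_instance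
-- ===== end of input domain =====

-- B replaces A's inside_table-flag + flush-buffer loop with a scan over maximal runs of
-- table / non-table lines (objective: alternative decomposition, same cost).

-- ===== PORT A =====
-- flush_table(): if buffer: append "```", "\n".join(buffer), "```" and clear the buffer
def flushA (acc buf : List String) : List String :=
  if buf = [] then acc else acc ++ ["```", PySem.Str.join "\n" buf, "```"]

-- the 'for line in lines' loop, threading (new_lines, inside_table, buffer)
def wrapA_loop : List String → List String → Bool → List String → List String × Bool × List String
  | [], acc, inside, buf => (acc, inside, buf)
  | l :: ls, acc, inside, buf =>
    if PySem.Str.startswith (PySem.Str.strip l) "|" && PySem.Str.endswith (PySem.Str.strip l) "|" then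
      wrapA_loop ls acc true (buf ++ [l])
    else if inside then
      wrapA_loop ls (flushA acc buf ++ [l]) false []
    else
      wrapA_loop ls (acc ++ [l]) inside buf

def wrap_markdown_tables_py (text : String) : String :=
  let lines := PySem.Str.splitlines text
  let s := wrapA_loop lines [] false []
  let acc := if s.2.1 then flushA s.1 s.2.2 else s.1
  PySem.Str.join "\n" acc

-- ===== PORT B =====
def isTable (l : String) : Bool :=
  let s := PySem.Str.strip l
  PySem.Str.startswith s "|" && PySem.Str.endswith s "|"

-- inner 'while j < n and is_table(lines[j]) == k: j += 1' counting from j = i+1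
def runLen : List String → Bool → Nat
  | [], _ => 0
  | l :: ls, k => if isTable l == k then runLen ls k + 1 else 0

-- outer while loop; the index i into lines is ported as structural recursion on the
-- remaining lines (drop i); lines[i:j] / lines[j:] with 0 ≤ i < j ≤ n are take/drop (exact)
def wrapB_loop : List String → List String → List String
  | [], acc => acc
  | l :: ls, acc =>
    let k := isTable l
    let j := runLen ls k + 1
    let run := (l :: ls).take j
    let rest := (l :: ls).drop j
    if k then wrapB_loop rest (acc ++ ["```", PySem.Str.join "\n" run, "```"])
    else wrapB_loop rest (acc ++ run)
termination_by ls _ => ls.length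
decreasing_by
  all_goals
    simp only [List.drop_succ_cons, List.length_cons, List.length_drop]
    omega

def wrap_markdown_tables_py_alt (text : String) : String :=
  PySem.Str.join "\n" (wrapB_loop (PySem.Str.splitlines text) [])

-- ===== PRECONDITION & SPEC =====
def Spec_wrap_markdown_tables_py (text : String) (out : String) : Prop := out = wrap_markdown_tables_py_alt text
instance (text : String) (out : String) : Decidable (Spec_wrap_markdown_tables_py text out) := by unfold Spec_wrap_markdown_tables_py; infer_instance

-- ===== CLAIM (what is proved, stated in full; the proofs are below) =====
def Claim_equal_wrap_markdown_tables_py : Prop := ∀ (text : String), Dom_wrap_markdown_tables_py text → Spec_wrap_markdown_tables_py text (wrap_markdown_tables_py text)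

-- ===== LEMMAS AND PROOFS =====

-- common reference: the output line list, defined by recursion on the line list
def specR : List String → List String
  | [] => []
  | l :: ls =>
    if isTable l then
      ["```", PySem.Str.join "\n" (l :: ls.takeWhile isTable), "```"] ++ specR (ls.dropWhile isTable)
    else l :: specR ls
termination_by ls => ls.length
decreasing_by
  all_goals simp only [List.length_cons]
  all_goals first
    | omega
    | (have := (List.dropWhile_sublist (l := ls) (p := isTable)).length_le; omega)

theorem specR_skip_nontable (ls : List String) :
    ls.takeWhile (fun x => !isTable x) ++ specR (ls.dropWhile (fun x => !isTable x))
      = specR ls := by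
  induction ls with
  | nil => simp [specR]
  | cons l ls ih =>
    by_cases h : isTable l
    · simp [List.takeWhile_cons, List.dropWhile_cons, h]
    · have hspec : specR (l :: ls) = l :: specR ls := by simp [specR, h]
      simp [List.takeWhile_cons, List.dropWhile_cons, h, hspec, ih]

-- the final 'if inside_table: flush_table()' applied to the loop's result
def finishA (ls acc : List String) (inside : Bool) (buf : List String) : List String :=
  let s := wrapA_loop ls acc inside buf
  if s.2.1 then flushA s.1 s.2.2 else s.1

theorem wrapA_char (ls : List String) :
    (∀ acc, finishA ls acc false [] = acc ++ specR ls) ∧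
    (∀ acc buf, buf ≠ [] →
      finishA ls acc true buf
        = acc ++ ["```", PySem.Str.join "\n" (buf ++ ls.takeWhile isTable), "```"]
            ++ specR (ls.dropWhile isTable)) := by
  induction ls with
  | nil =>
    constructor
    · intro acc; simp [finishA, wrapA_loop, specR]
    · intro acc buf hbuf
      simp [finishA, wrapA_loop, specR, flushA, hbuf]
  | cons l ls ih =>
    obtain ⟨ih1, ih2⟩ := ih
    have hc : (PySem.Str.startswith (PySem.Str.strip l) "|"
        && PySem.Str.endswith (PySem.Str.strip l) "|") = isTable l := rfl
    constructor
    · intro acc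
      by_cases h : isTable l
      · have hspec : specR (l :: ls)
            = ["```", PySem.Str.join "\n" (l :: ls.takeWhile isTable), "```"]
                ++ specR (ls.dropWhile isTable) := by simp [specR, h]
        simp only [finishA, wrapA_loop, hc, h, if_true, hspec]
        have := ih2 acc [l] (by simp)
        simp only [finishA] at this
        simpa using this
      · have hspec : specR (l :: ls) = l :: specR ls := by simp [specR, h]
        simp only [finishA, wrapA_loop, hc, h, if_false, Bool.false_eq_true, hspec]
        have := ih1 (acc ++ [l])
        simp only [finishA] at this
        simpa using this
    · intro acc buf hbuf
      by_cases h : isTable l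
      · simp only [finishA, wrapA_loop, hc, h, if_true]
        have := ih2 acc (buf ++ [l]) (by simp)
        simp only [finishA] at this
        simpa [List.takeWhile_cons, List.dropWhile_cons, h] using this
      · have hspec : specR (l :: ls) = l :: specR ls := by simp [specR, h]
        simp only [finishA, wrapA_loop, hc, h, if_false, Bool.false_eq_true, if_true]
        have := ih1 (flushA acc buf ++ [l])
        simp only [finishA] at this
        simpa [flushA, hbuf, List.takeWhile_cons, List.dropWhile_cons, h, hspec] using this

theorem runLen_take (ls : List String) (k : Bool) :
    ls.take (runLen ls k) = ls.takeWhile (fun x => isTable x == k) := by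
  induction ls with
  | nil => simp [runLen]
  | cons l ls ih =>
    by_cases h : (isTable l == k) = true
    · simp [runLen, h, ih]
    · simp [runLen, h]

theorem runLen_drop (ls : List String) (k : Bool) :
    ls.drop (runLen ls k) = ls.dropWhile (fun x => isTable x == k) := by
  induction ls with
  | nil => simp [runLen]
  | cons l ls ih =>
    by_cases h : (isTable l == k) = true
    · simp [runLen, h, ih]
    · simp [runLen, h]

theorem wrapB_char (n : Nat) : ∀ ls : List String, ls.length ≤ n →
    ∀ acc, wrapB_loop ls acc = acc ++ specR ls := by
  induction n with
  | zero =>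
    intro ls h acc
    have : ls = [] := List.length_eq_zero_iff.mp (Nat.le_zero.mp h)
    subst this; simp [wrapB_loop, specR]
  | succ n ih =>
    intro ls h acc
    match ls with
    | [] => simp [wrapB_loop, specR]
    | l :: ls =>
      have hrest : ((l :: ls).drop (runLen ls (isTable l) + 1)).length ≤ n := by
        rw [List.drop_succ_cons, runLen_drop]
        have := (List.dropWhile_sublist (l := ls)
          (p := fun x => isTable x == isTable l)).length_le
        simp only [List.length_cons] at h
        omega
      by_cases hk : isTable l
      · have hB := ih _ hrest (acc ++ ["```",
          PySem.Str.join "\n" ((l :: ls).take (runLen ls (isTable l) + 1)), "```"])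
        have hunfold : wrapB_loop (l :: ls) acc
            = wrapB_loop ((l :: ls).drop (runLen ls (isTable l) + 1)) (acc ++ ["```",
                PySem.Str.join "\n" ((l :: ls).take (runLen ls (isTable l) + 1)), "```"]) := by
          simp [wrapB_loop, hk]
        rw [hunfold, hB, List.drop_succ_cons, List.take_succ_cons, runLen_take, runLen_drop]
        have hspec : specR (l :: ls)
            = ["```", PySem.Str.join "\n" (l :: ls.takeWhile isTable), "```"]
                ++ specR (ls.dropWhile isTable) := by simp [specR, hk]
        rw [hspec]
        simp [hk]
      · have hB := ih _ hrest (acc ++ (l :: ls).take (runLen ls (isTable l) + 1))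
        have hunfold : wrapB_loop (l :: ls) acc
            = wrapB_loop ((l :: ls).drop (runLen ls (isTable l) + 1))
                (acc ++ (l :: ls).take (runLen ls (isTable l) + 1)) := by
          simp [wrapB_loop, hk]
        rw [hunfold, hB, List.drop_succ_cons, List.take_succ_cons, runLen_take, runLen_drop]
        have hk' : isTable l = false := by simpa using hk
        have hspec : specR (l :: ls) = l :: specR ls := by simp [specR, hk']
        rw [hspec]
        have hfun : (fun x : String => isTable x == false) = (fun x => !isTable x) := by
          funext x; cases isTable x <;> rfl
        simp only [hk', List.append_assoc, List.cons_append, hfun, specR_skip_nontable]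

-- ===== VERDICT (by name: the statement is the Claim_ definition above) =====
theorem wrap_markdown_tables_py_spec : Claim_equal_wrap_markdown_tables_py := by
  intro text _
  unfold Spec_wrap_markdown_tables_py
  have e1 : wrap_markdown_tables_py text
      = PySem.Str.join "\n" (finishA (PySem.Str.splitlines text) [] false []) := rfl
  have e2 : wrap_markdown_tables_py_alt text
      = PySem.Str.join "\n" (wrapB_loop (PySem.Str.splitlines text) []) := rfl
  rw [e1, e2, (wrapA_char _).1 [],
    wrapB_char (PySem.Str.splitlines text).length _ le_rfl []]
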